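-- pv_equiv track=rewrite | github.com/clareziegler/advent-of-code-24 | Day1.py | find_first_number
-- ===== SOURCE A (Python) =====
-- def find_first_number(string, numbers):
--     lowest_index = len(string) + 1
--
--     for number in numbers:
--         index = string.find(number)
--         if index != -1 and index < lowest_index:
--             lowest_index = index
--             first_number = number
--     return first_number
-- ===== SOURCE B (Python) =====
-- def find_first_number(string, numbers):
--     # Single left-to-right positional sweep with early return: at the first
--     # position where any of the numbers starts, return the first such number
--     # in `numbers` order (same earliest-occurrence / list-order tie-break as A,
--     # with no find/min bookkeeping).  Falls through (returns None) when no
--     # number occurs in `string`; A raises UnboundLocalError there (excluded by Pre_).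
--     for pos in range(len(string) + 1):
--         for number in numbers:
--             if string.startswith(number, pos):
--                 return number
-- ===== Notes on version B (the rewrite author's own statement) =====
-- stated objective: faster
-- what changed: Replaces A's per-number full find() scans plus min-index/first-assignment bookkeeping with a single left-to-right positional sweep that returns early at the first position where any number starts (first in list order wins).
import Mathlib
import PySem

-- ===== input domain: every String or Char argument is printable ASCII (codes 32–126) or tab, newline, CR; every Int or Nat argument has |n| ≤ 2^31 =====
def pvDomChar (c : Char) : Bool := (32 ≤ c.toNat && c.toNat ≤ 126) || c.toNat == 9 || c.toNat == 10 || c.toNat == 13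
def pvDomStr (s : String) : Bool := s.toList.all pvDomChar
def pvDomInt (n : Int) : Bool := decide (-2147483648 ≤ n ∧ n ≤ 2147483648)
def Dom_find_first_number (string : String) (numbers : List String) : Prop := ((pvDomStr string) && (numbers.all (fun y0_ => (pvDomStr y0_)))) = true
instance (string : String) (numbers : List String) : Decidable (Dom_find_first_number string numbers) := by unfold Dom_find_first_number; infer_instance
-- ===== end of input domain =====

-- B replaces A's per-number find() scans + min-index bookkeeping by a single
-- left-to-right positional sweep with early return (alternative decomposition;
-- same earliest-match / list-order tie-break).  Return-value equivalence only.

-- ===== PORT A =====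
-- one loop iteration of A: index = string.find(number); update (lowest_index, first_number)
def stepA (s : List Char) (st : Int × Option String) (number : String) : Int × Option String :=
  let index := PySem.Chars.find s number.toList
  if index ≠ -1 ∧ index < st.1 then (index, some number) else st

def find_first_number (string : String) (numbers : List String) : String :=
  let s := string.toList
  let r := numbers.foldl (stepA s) (((s.length : Int) + 1, none))
  -- Python returns the possibly-unassigned first_number: none here = UnboundLocalError,
  -- excluded by Pre_; the "" default is never reached under Pre_.
  (r.2).getD ""

-- ===== PORT B =====
-- outer loop over positions; inner loop `for number in numbers: if startswith: return`
-- is the first-match search find?; string.startswith(number, pos) = startswith on drop pos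
def altScan (s : List Char) (numbers : List String) : List Nat → String
  | [] => ""   -- Python B falls through (returns None) here; excluded by Pre_
  | pos :: rest =>
    match numbers.find? (fun n => PySem.Chars.startswith (s.drop pos) n.toList) with
    | some n => n
    | none => altScan s numbers rest

def find_first_number_alt (string : String) (numbers : List String) : String :=
  altScan string.toList numbers (List.range (string.toList.length + 1))

-- ===== PRECONDITION & SPEC =====
-- Pre_ excludes exactly the inputs where no number occurs in the string: there the
-- Python A raises UnboundLocalError (first_number never assigned).
def Pre_find_first_number (string : String) (numbers : List String) : Prop :=
  ∃ n ∈ numbers, PySem.Str.isIn n string = true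
instance (string : String) (numbers : List String) : Decidable (Pre_find_first_number string numbers) := by unfold Pre_find_first_number; infer_instance
def pvWitness_find_first_number : String × List String := ("a1b2", ["2", "1"])

def Spec_find_first_number (string : String) (numbers : List String) (out : String) : Prop := out = find_first_number_alt string numbers
instance (string : String) (numbers : List String) (out : String) : Decidable (Spec_find_first_number string numbers out) := by unfold Spec_find_first_number; infer_instance

-- ===== CLAIM (what is proved, stated in full; the proofs are below) =====
def Claim_equal_find_first_number : Prop := ∀ (string : String) (numbers : List String), Dom_find_first_number string numbers → Pre_find_first_number string numbers → Spec_find_first_number string numbers (find_first_number string numbers)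

-- ===== LEMMAS AND PROOFS =====

-- once lowest_index has reached the global minimum m, A's fold never updates again
lemma foldA_stuck (s : List Char) (t : List String) (m : Int) (cur : Option String)
    (h : ∀ n ∈ t, PySem.Chars.find s n.toList = -1 ∨ m ≤ PySem.Chars.find s n.toList) :
    t.foldl (stepA s) (m, cur) = (m, cur) := by
  induction t with
  | nil => rfl
  | cons n t ih =>
    have hn := h n (by simp)
    have hcond : ¬ (PySem.Chars.find s n.toList ≠ -1 ∧ PySem.Chars.find s n.toList < m) := by
      intro hc; rcases hn with h1 | h1 <;> omega
    simp only [List.foldl_cons, stepA, if_neg hcond]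
    exact ih (fun x hx => h x (by simp [hx]))

-- A's fold returns the FIRST number achieving the minimal find index m
lemma foldA_min (s : List Char) (l : List String) (low : Int) (cur : Option String) (m : Int)
    (h0 : 0 ≤ m) (hm : m < low)
    (hmin : ∀ n ∈ l, PySem.Chars.find s n.toList = -1 ∨ m ≤ PySem.Chars.find s n.toList)
    (hex : ∃ n ∈ l, PySem.Chars.find s n.toList = m) :
    (l.foldl (stepA s) (low, cur)).2 = l.find? (fun n => PySem.Chars.find s n.toList == m) := by
  induction l generalizing low cur with
  | nil => rcases hex with ⟨n, hn, _⟩; cases hn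
  | cons n t ih =>
    by_cases hnm : PySem.Chars.find s n.toList = m
    · have hcond : (PySem.Chars.find s n.toList ≠ -1 ∧ PySem.Chars.find s n.toList < low) := by
        constructor <;> omega
      simp only [List.foldl_cons, stepA]
      rw [if_pos hcond, hnm]
      rw [foldA_stuck s t m (some n) (fun x hx => hmin x (by simp [hx]))]
      simp [hnm]
    · have ht : ∃ x ∈ t, PySem.Chars.find s x.toList = m := by
        rcases hex with ⟨x, hx, hxm⟩
        rcases List.mem_cons.mp hx with rfl | hx'
        · exact absurd hxm hnm
        · exact ⟨x, hx', hxm⟩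
      have hmint : ∀ x ∈ t, PySem.Chars.find s x.toList = -1 ∨ m ≤ PySem.Chars.find s x.toList :=
        fun x hx => hmin x (by simp [hx])
      have hfind : (n :: t).find? (fun x => PySem.Chars.find s x.toList == m)
          = t.find? (fun x => PySem.Chars.find s x.toList == m) := by
        simp [hnm]
      rw [hfind]
      simp only [List.foldl_cons, stepA]
      by_cases hcond : (PySem.Chars.find s n.toList ≠ -1 ∧ PySem.Chars.find s n.toList < low)
      · rw [if_pos hcond]
        have hnge : m ≤ PySem.Chars.find s n.toList := by
          rcases hmin n (by simp) with h1 | h1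
          · exact absurd h1 hcond.1
          · exact h1
        have : m < PySem.Chars.find s n.toList := lt_of_le_of_ne hnge (fun h => hnm h.symm)
        exact ih _ _ this hmint ht
      · rw [if_neg hcond]
        exact ih _ _ hm hmint ht

-- B's scan skips every position with no match
lemma altScan_append_none (s : List Char) (numbers : List String) (ps qs : List Nat)
    (h : ∀ p ∈ ps, numbers.find? (fun n => PySem.Chars.startswith (s.drop p) n.toList) = none) :
    altScan s numbers (ps ++ qs) = altScan s numbers qs := by
  induction ps with
  | nil => rfl
  | cons p ps ih =>
    simp only [List.cons_append, altScan, h p (by simp)]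
    exact ih (fun x hx => h x (by simp [hx]))

-- find? respects pointwise-on-members equal predicates
lemma find?_congr_mem {α : Type} (l : List α) (p q : α → Bool)
    (h : ∀ x ∈ l, p x = q x) : l.find? p = l.find? q := by
  induction l with
  | nil => rfl
  | cons x t ih =>
    simp only [List.find?_cons, h x (by simp)]
    cases q x
    · exact ih (fun y hy => h y (by simp [hy]))
    · rfl

-- ===== VERDICT (by name: the statement is the Claim_ definition above) =====
theorem find_first_number_spec : Claim_equal_find_first_number := by
  intro string numbers _ hpre
  unfold Spec_find_first_number find_first_number find_first_number_alt
  set s := string.toList with hs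
  -- the position predicate: some number starts at pos
  have hPex : ∃ pos : Nat, ∃ n ∈ numbers, n.toList <+: s.drop pos := by
    rcases hpre with ⟨n, hn, hin⟩
    have hinf : n.toList <:+: s := (PySem.Str.isIn_iff_infix n string).mp hin
    have hne : PySem.Chars.find s n.toList ≠ -1 := (PySem.Chars.find_ne_neg_one_iff s n.toList).mpr hinf
    have hnn : 0 ≤ PySem.Chars.find s n.toList := (PySem.Chars.find_nonneg_iff s n.toList).mpr hinf
    exact ⟨(PySem.Chars.find s n.toList).toNat, n, hn, (PySem.Chars.find_spec hnn).1⟩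
  classical
  set m := Nat.find hPex with hmdef
  have hPm : ∃ n ∈ numbers, n.toList <+: s.drop m := Nat.find_spec hPex
  have hPlt : ∀ p, p < m → ¬ ∃ n ∈ numbers, n.toList <+: s.drop p := fun p hp => Nat.find_min hPex hp
  -- key: for n ∈ numbers, find s n = m  ↔  n starts at m
  have hkey : ∀ n ∈ numbers, (PySem.Chars.find s n.toList = (m : Int)) ↔ n.toList <+: s.drop m := by
    intro n hn
    constructor
    · intro h
      have hnn : 0 ≤ PySem.Chars.find s n.toList := by omega
      have := (PySem.Chars.find_spec hnn).1
      rwa [h, Int.toNat_natCast] at this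
    · intro hpre'
      have hinf : n.toList <:+: s := List.IsInfix.trans hpre'.isInfix (List.drop_suffix m s).isInfix
      have hnn : 0 ≤ PySem.Chars.find s n.toList := (PySem.Chars.find_nonneg_iff s n.toList).mpr hinf
      have hspec := PySem.Chars.find_spec hnn
      -- find ≤ m : otherwise m < toNat find contradicts minimality clause of find_spec
      have hle : (PySem.Chars.find s n.toList).toNat ≤ m := by
        by_contra hlt
        exact hspec.2 m (by omega) hpre'
      -- m ≤ find : position toNat find has a match, so Nat.find minimality
      have hge : m ≤ (PySem.Chars.find s n.toList).toNat :=
        Nat.find_le ⟨n, hn, hspec.1⟩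
      omega
    -- every number either misses or has find ≥ m
  have hmin : ∀ n ∈ numbers, PySem.Chars.find s n.toList = -1 ∨ (m : Int) ≤ PySem.Chars.find s n.toList := by
    intro n hn
    by_cases h1 : PySem.Chars.find s n.toList = -1
    · exact Or.inl h1
    · right
      have hnn : 0 ≤ PySem.Chars.find s n.toList := by
        have := PySem.Chars.neg_one_le_find s n.toList; omega
      have hspec := PySem.Chars.find_spec hnn
      have := Nat.find_le (h := hPex) ⟨n, hn, hspec.1⟩
      omega
  have hex : ∃ n ∈ numbers, PySem.Chars.find s n.toList = (m : Int) := by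
    rcases hPm with ⟨n, hn, hp⟩
    exact ⟨n, hn, (hkey n hn).mpr hp⟩
  -- m ≤ len s
  have hmle : m ≤ s.length := by
    rcases hex with ⟨n, hn, hnm⟩
    have := PySem.Chars.find_le_length s n.toList
    omega
  -- A-side evaluation
  have hA : (numbers.foldl (stepA s) (((s.length : Int) + 1, none))).2
      = numbers.find? (fun n => PySem.Chars.find s n.toList == (m : Int)) :=
    foldA_min s numbers _ none (m : Int) (by omega) (by omega) hmin hex
  -- B-side evaluation
  have hrange : List.range (s.length + 1) = List.range m ++ List.range' m (s.length + 1 - m) := by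
    rw [List.range_eq_range', List.range_eq_range',
        show s.length + 1 = m + (s.length + 1 - m) by omega, ← List.range'_append]
    simp
  have hnone : ∀ p ∈ List.range m,
      numbers.find? (fun n => PySem.Chars.startswith (s.drop p) n.toList) = none := by
    intro p hp
    rw [List.find?_eq_none]
    intro n hn hb
    exact hPlt p (List.mem_range.mp hp) ⟨n, hn, (PySem.Chars.startswith_iff _ _).mp hb⟩
  have hfindm : numbers.find? (fun n => PySem.Chars.startswith (s.drop m) n.toList)
      = numbers.find? (fun n => PySem.Chars.find s n.toList == (m : Int)) := by
    apply find?_congr_mem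
    intro n hn
    by_cases h : PySem.Chars.startswith (s.drop m) n.toList = true
    · rw [h]
      symm; rw [beq_iff_eq]
      exact (hkey n hn).mpr ((PySem.Chars.startswith_iff _ _).mp h)
    · rw [Bool.not_eq_true] at h
      rw [h]
      symm; rw [beq_eq_false_iff_ne]
      intro hc
      have hnp : ¬ n.toList <+: s.drop m := by
        rw [← PySem.Chars.startswith_iff]; simp [h]
      exact hnp ((hkey n hn).mp hc)
  have hB : altScan s numbers (List.range (s.length + 1))
      = altScan s numbers (List.range' m (s.length + 1 - m)) := by
    rw [hrange]; exact altScan_append_none s numbers _ _ hnone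
  have hlen : s.length + 1 - m = (s.length - m) + 1 := by omega
  rw [hB, hlen, List.range'_succ]
  show (numbers.foldl (stepA s) (((s.length : Int) + 1, none))).2.getD ""
      = altScan s numbers (m :: List.range' (m + 1) (s.length - m))
  rw [hA]
  simp only [altScan, hfindm]
  rcases hex with ⟨n, hn, hnm⟩
  have : numbers.find? (fun n => PySem.Chars.find s n.toList == (m : Int)) ≠ none := by
    rw [Ne, List.find?_eq_none]
    push Not
    exact ⟨n, hn, by simp [hnm]⟩
  rcases Option.ne_none_iff_exists'.mp this with ⟨v, hv⟩
  rw [hv]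
  rfl
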